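-- pv_equiv track=rewrite | github.com/JCRaymond/Google_Code_Jams | (PCJ1) All_Your_Base/Methods.py | get_lowest_num
-- ===== SOURCE A (Python) =====
-- lowest = 0
--
-- def get_lowest_num(string):
--     if len(string) < 1:
--         return ""
--     symbol_val = {string[0]:chr(lowest+1),}
--     num = str(chr(lowest+1))
--     string = string[1:]
--     val = lowest
--     for car in string:
--         if car not in symbol_val.keys():
--             symbol_val[car] = chr(val)
--             val+=1
--             if val == lowest+1:
--                 val+=1
--
--         num += symbol_val[car]
--     return num
-- ===== SOURCE B (Python) =====
-- def get_lowest_num(string):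
--     seen = set()
--     order = []
--     for c in string:
--         if c not in seen:
--             seen.add(c)
--             order.append(c)
--     mapping = {c: chr(1 - i) if i < 2 else chr(i) for i, c in enumerate(order)}
--     return ''.join(mapping[c] for c in string)
-- ===== Notes on version B (the rewrite author's own statement) =====
-- stated objective: simpler
-- what changed: A's single interleaved loop with a skip-counter and a growing dict is replaced by three separate passes: extract the first-appearance alphabet, assign symbols by a closed-form rule on the position (0->chr(1), 1->chr(0), i>=2->chr(i)), then map the string through the finished table.
import Mathlib
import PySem

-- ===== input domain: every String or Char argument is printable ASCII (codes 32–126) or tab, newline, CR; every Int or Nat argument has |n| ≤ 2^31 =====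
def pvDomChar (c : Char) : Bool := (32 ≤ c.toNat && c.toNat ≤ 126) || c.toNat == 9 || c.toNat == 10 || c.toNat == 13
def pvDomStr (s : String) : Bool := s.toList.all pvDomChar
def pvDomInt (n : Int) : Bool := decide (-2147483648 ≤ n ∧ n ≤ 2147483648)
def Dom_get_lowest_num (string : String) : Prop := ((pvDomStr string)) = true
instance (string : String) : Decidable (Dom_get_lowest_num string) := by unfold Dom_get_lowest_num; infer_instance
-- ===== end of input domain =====

-- B replaces A's single interleaved loop (growing dict + skip-counter) by three separate
-- passes: first-appearance alphabet extraction, closed-form symbol assignment by position,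
-- and a final table lookup; objective: simpler, same asymptotic cost.

-- ===== PORT A =====
def lowest : Int := 0

-- the loop body of A: insert a fresh symbol (skipping the value lowest+1), then append symbol_val[car]
def glnStepA (st : PySem.Dict Char Char × List Char × Int) (car : Char) :
    PySem.Dict Char Char × List Char × Int :=
  let sv := st.1
  let num := st.2.1
  let val := st.2.2
  let (sv, val) :=
    if sv.contains car = false then          -- if car not in symbol_val.keys():
      let sv := sv.insert car (Char.ofNat val.toNat)   -- symbol_val[car] = chr(val)  (val is always ≥ 0 here)
      let val := val + 1
      let val := if val = lowest + 1 then val + 1 else val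
      (sv, val)
    else
      (sv, val)
  (sv, num ++ [sv.getD car (Char.ofNat 0)], val)   -- num += symbol_val[car] (key always present)

def get_lowest_num (string : String) : String :=
  match string.toList with
  | [] => ""                                    -- if len(string) < 1: return ""
  | c0 :: rest =>                               -- string[0] = c0, string[1:] = rest
    let symbol_val : PySem.Dict Char Char :=
      PySem.Dict.insert PySem.Dict.empty c0 (Char.ofNat (lowest + 1).toNat)
    let num : List Char := [Char.ofNat (lowest + 1).toNat]
    let fin := rest.foldl glnStepA (symbol_val, num, lowest)
    String.ofList fin.2.1

-- ===== PORT B =====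
-- the closed-form symbol for the i-th distinct character: 0 -> chr 1, 1 -> chr 0, i ≥ 2 -> chr i
def glnCode (i : Int) : Char := if i < 2 then Char.ofNat (1 - i).toNat else Char.ofNat i.toNat

-- B's dict comprehension: mapping = {c: (chr(1-i) if i < 2 else chr(i)) for i, c in enumerate(order)}
def glnMap (order : List Char) : PySem.Dict Char Char :=
  (PySem.List.enumerate order).foldl (fun d p => d.insert p.2 (glnCode p.1)) PySem.Dict.empty

-- B's first loop body: seen-set plus first-appearance order list
def glnOrderStep (st : PySem.Set Char × List Char) (c : Char) : PySem.Set Char × List Char :=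
  if PySem.Set.contains st.1 c then st else (PySem.Set.add st.1 c, st.2 ++ [c])

def get_lowest_num_alt (string : String) : String :=
  let cs := string.toList
  let st := cs.foldl glnOrderStep (PySem.Set.empty, [])
  let mapping := glnMap st.2
  String.ofList (cs.map (fun c => mapping.getD c (Char.ofNat 0)))   -- ''.join(mapping[c] for c in string); key always present

-- ===== PRECONDITION & SPEC =====
def Spec_get_lowest_num (string : String) (out : String) : Prop := out = get_lowest_num_alt string
instance (string : String) (out : String) : Decidable (Spec_get_lowest_num string out) := by unfold Spec_get_lowest_num; infer_instance

-- ===== CLAIM (what is proved, stated in full; the proofs are below) =====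
def Claim_equal_get_lowest_num : Prop := ∀ (string : String), Dom_get_lowest_num string → Spec_get_lowest_num string (get_lowest_num string)

-- ===== LEMMAS AND PROOFS =====

-- the first-appearance extension of an alphabet d by a char list cs
def glnOrd (d cs : List Char) : List Char :=
  cs.foldl (fun acc c => if PySem.Set.contains acc c then acc else acc ++ [c]) d

-- A's counter value once the alphabet has grown to d
def glnVal (d : List Char) : Int := if d.length = 1 then 0 else d.length

lemma glnMap_items (d : List Char) (hd : d.Nodup) :
    (glnMap d).items = (PySem.List.enumerate d).map (fun p => (p.2, glnCode p.1)) := by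
  have h := PySem.Dict.items_foldl_insert_fresh (PySem.List.enumerate d)
    (fun p => p.2) (fun p => glnCode p.1) PySem.Dict.empty
    (by intro a _; simp [PySem.Dict.contains_empty])
    (by simpa [PySem.List.map_snd_enumerate] using hd)
  simpa [glnMap] using h

lemma glnMap_keys (d : List Char) (hd : d.Nodup) : (glnMap d).keys = d := by
  simp only [PySem.Dict.keys, glnMap_items d hd, List.map_map]
  exact PySem.List.map_snd_enumerate d 0

lemma glnMap_getD (d : List Char) (hd : d.Nodup) (c : Char) (hc : c ∈ d) (d0 : Char) :
    (glnMap d).getD c d0 = glnCode (d.idxOf c) := by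
  have hi : d.idxOf c < d.length := List.idxOf_lt_length_of_mem hc
  have hmem : ((c, glnCode (d.idxOf c)) : Char × Char) ∈ (glnMap d).items := by
    rw [glnMap_items d hd]
    refine List.mem_map.mpr ⟨((d.idxOf c : Int), c), ?_, by simp⟩
    rw [PySem.List.mem_enumerate_iff]
    exact ⟨d.idxOf c, hi, by simp [List.getElem_idxOf]⟩
  exact PySem.Dict.getD_of_mem_items _ hmem (by rw [glnMap_keys d hd]; exact hd) d0

lemma nodup_append_singleton (d : List Char) (c : Char) (hd : d.Nodup) (hc : c ∉ d) :
    (d ++ [c]).Nodup := by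
  simp [List.nodup_append, hd]; exact fun a ha h => hc (h ▸ ha)

lemma glnMap_insert (d : List Char) (hd : d.Nodup) (c : Char) (hc : c ∉ d) :
    (glnMap d).insert c (glnCode d.length) = glnMap (d ++ [c]) := by
  apply PySem.Dict.ext
  have hnc : (glnMap d).contains c = false := by
    rw [← Bool.not_eq_true, PySem.Dict.contains_iff_mem_keys, glnMap_keys d hd]
    exact hc
  rw [PySem.Dict.items_insert_of_not_contains _ _ hnc,
      glnMap_items d hd, glnMap_items (d ++ [c]) (nodup_append_singleton d c hd hc),
      PySem.List.enumerate_append]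
  simp [PySem.List.enumerate_cons, PySem.List.enumerate_nil]

lemma glnOrd_cons (d : List Char) (c : Char) (cs : List Char) :
    glnOrd d (c :: cs) = if c ∈ d then glnOrd d cs else glnOrd (d ++ [c]) cs := by
  by_cases h : c ∈ d <;> simp [glnOrd, h]

lemma glnOrd_prefix (d cs : List Char) : d <+: glnOrd d cs := by
  induction cs generalizing d with
  | nil => exact List.prefix_rfl
  | cons c cs ih =>
    rw [glnOrd_cons]
    by_cases h : c ∈ d
    · simpa [h] using ih d
    · simp only [h, if_false]
      exact List.IsPrefix.trans (List.prefix_append d [c]) (ih (d ++ [c]))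

lemma glnOrd_nodup (d cs : List Char) (hd : d.Nodup) : (glnOrd d cs).Nodup := by
  induction cs generalizing d with
  | nil => exact hd
  | cons c cs ih =>
    rw [glnOrd_cons]
    by_cases h : c ∈ d
    · simpa [h] using ih d hd
    · simp only [h, if_false]
      exact ih _ (nodup_append_singleton d c hd h)

lemma idxOf_glnOrd (d cs : List Char) (c : Char) (hc : c ∈ d) :
    (glnOrd d cs).idxOf c = d.idxOf c := by
  obtain ⟨t, ht⟩ := glnOrd_prefix d cs
  rw [← ht]; exact List.idxOf_append_of_mem hc

lemma getD_glnMap_glnOrd (d cs : List Char) (hd : d.Nodup) (c : Char) (hc : c ∈ d) (d0 : Char) :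
    (glnMap (glnOrd d cs)).getD c d0 = glnCode (d.idxOf c) := by
  rw [glnMap_getD _ (glnOrd_nodup d cs hd) c ((glnOrd_prefix d cs).subset hc) d0,
      idxOf_glnOrd d cs c hc]

lemma glnValChar (d : List Char) (hne : d ≠ []) :
    Char.ofNat (glnVal d).toNat = glnCode (d.length : Int) := by
  have h1 : 1 ≤ d.length := List.length_pos_of_ne_nil hne
  by_cases h : d.length = 1
  · simp [glnVal, glnCode, h]
  · have h2 : 2 ≤ d.length := by omega
    have hx : ¬ ((d.length : Int) < 2) := by exact_mod_cast by omega
    simp [glnVal, glnCode, h, hx]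

lemma glnVal_step (d : List Char) (c : Char) (hne : d ≠ []) :
    (if glnVal d + 1 = lowest + 1 then glnVal d + 1 + 1 else glnVal d + 1) =
      glnVal (d ++ [c]) := by
  have h1 : 1 ≤ d.length := List.length_pos_of_ne_nil hne
  simp only [glnVal, lowest, List.length_append, List.length_cons, List.length_nil]
  split_ifs <;> push_cast <;> omega

lemma loopA (rest : List Char) : ∀ (d num : List Char), d ≠ [] → d.Nodup →
    rest.foldl glnStepA (glnMap d, num, glnVal d) =
      (glnMap (glnOrd d rest),
       num ++ rest.map (fun c => (glnMap (glnOrd d rest)).getD c (Char.ofNat 0)),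
       glnVal (glnOrd d rest)) := by
  induction rest with
  | nil => intro d num _ _; simp [glnOrd]
  | cons car rest ih =>
    intro d num hne hd
    rw [List.foldl_cons, glnOrd_cons]
    by_cases h : car ∈ d
    · have hcon : (glnMap d).contains car = true := by
        rw [PySem.Dict.contains_iff_mem_keys, glnMap_keys d hd]; exact h
      have hstep : glnStepA (glnMap d, num, glnVal d) car =
          (glnMap d, num ++ [(glnMap d).getD car (Char.ofNat 0)], glnVal d) := by
        simp [glnStepA, hcon]
      rw [hstep, ih d _ hne hd]
      simp [h, glnMap_getD d hd car h, getD_glnMap_glnOrd d rest hd car h]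
    · have hcon : (glnMap d).contains car = false := by
        rw [← Bool.not_eq_true, PySem.Dict.contains_iff_mem_keys, glnMap_keys d hd]; exact h
      have hstep : glnStepA (glnMap d, num, glnVal d) car =
          (glnMap (d ++ [car]),
           num ++ [(glnMap (d ++ [car])).getD car (Char.ofNat 0)],
           glnVal (d ++ [car])) := by
        simp only [glnStepA, hcon]
        rw [glnValChar d hne, glnMap_insert d hd car h, glnVal_step d car hne]
        simp
      rw [hstep, ih (d ++ [car]) _ (by simp) (nodup_append_singleton d car hd h)]
      have hcm : car ∈ d ++ [car] := by simp
      simp [h, glnMap_getD _ (nodup_append_singleton d car hd h) car hcm,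
            getD_glnMap_glnOrd (d ++ [car]) rest (nodup_append_singleton d car hd h) car hcm]

lemma orderFold (cs : List Char) : ∀ (s : List Char),
    cs.foldl glnOrderStep (s, s) = (glnOrd s cs, glnOrd s cs) := by
  induction cs with
  | nil => intro s; simp [glnOrd]
  | cons c cs ih =>
    intro s
    rw [List.foldl_cons, glnOrd_cons]
    by_cases h : c ∈ s
    · have : glnOrderStep (s, s) c = (s, s) := by
        simp [glnOrderStep, h]
      rw [this, ih s]; simp [h]
    · have : glnOrderStep (s, s) c = (s ++ [c], s ++ [c]) := by
        simp [glnOrderStep, h, PySem.Set.add]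
      rw [this, ih (s ++ [c])]; simp [h]

-- ===== VERDICT (by name: the statement is the Claim_ definition above) =====
theorem get_lowest_num_spec : Claim_equal_get_lowest_num := by
  intro s _
  unfold Spec_get_lowest_num get_lowest_num get_lowest_num_alt
  cases hs : s.toList with
  | nil => simp
  | cons c0 rest =>
    simp only []
    have hdict : PySem.Dict.insert PySem.Dict.empty c0 (Char.ofNat (lowest + 1).toNat) = glnMap [c0] := rfl
    have hval : lowest = glnVal [c0] := rfl
    rw [hdict, hval, loopA rest [c0] _ (by simp) (by simp)]
    have hB : List.foldl glnOrderStep (PySem.Set.empty, []) (c0 :: rest) =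
        (glnOrd [c0] rest, glnOrd [c0] rest) := by
      rw [List.foldl_cons]
      have : glnOrderStep (PySem.Set.empty, []) c0 = ([c0], [c0]) := by
        simp [glnOrderStep, PySem.Set.add, PySem.Set.empty]
      rw [this, orderFold rest [c0]]
    rw [hB]
    have hc0 : (glnMap (glnOrd [c0] rest)).getD c0 (Char.ofNat 0) = glnCode 0 := by
      have := getD_glnMap_glnOrd [c0] rest (by simp) c0 (by simp) (Char.ofNat 0)
      simpa using this
    simp [hc0, glnCode, glnVal]
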